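-- pv_equiv track=rewrite | github.com/sudhan7/A2Z_Strivers_DSA_Sheet | Day 47/getWorkflowReplacements.py | getWorkflowReplacements
-- ===== SOURCE A (Python) =====
-- def getWorkflowReplacements(config):
--     MOD = 10**9 + 7
--     digits = 10
--
--     dp = [0] * digits
--
--     # initialize first position
--     if config[0] == '?':
--         for d in range(digits):
--             dp[d] = 1
--     else:
--         dp[int(config[0])] = 1
--
--     for i in range(1, len(config)):
--         new_dp = [0] * digits
--         total = sum(dp) % MOD
--
--         if config[i] == '?':
--             for d in range(digits):
--                 new_dp[d] = (total - dp[d]) % MOD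
--         else:
--             d = int(config[i])
--             new_dp[d] = (total - dp[d]) % MOD
--
--         dp = new_dp
--
--     return sum(dp) % MOD
-- ===== SOURCE B (Python) =====
-- def getWorkflowReplacements(config):
--     # Scalar DP: the dp vector of A always has one value `spec` at the last
--     # fixed digit `special` and a shared value `common` everywhere else.
--     MOD = 10**9 + 7
--     if config[0] == '?':
--         common, spec, special = 1, 1, 0
--     else:
--         common, spec, special = 0, 1, int(config[0])
--     for ch in config[1:]:
--         total = (spec + 9 * common) % MOD
--         if ch == '?':
--             common, spec = (total - common) % MOD, (total - spec) % MOD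
--         else:
--             d = int(ch)
--             spec = (total - (spec if d == special else common)) % MOD
--             common = 0
--             special = d
--     return (spec + 9 * common) % MOD
-- ===== Notes on version B (the rewrite author's own statement) =====
-- stated objective: alternative
-- what changed: Replaces A's 10-element dp list (rebuilt and summed every iteration) by three scalars (common, spec, special) exploiting that the dp vector always holds at most two distinct values.
import Mathlib
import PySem

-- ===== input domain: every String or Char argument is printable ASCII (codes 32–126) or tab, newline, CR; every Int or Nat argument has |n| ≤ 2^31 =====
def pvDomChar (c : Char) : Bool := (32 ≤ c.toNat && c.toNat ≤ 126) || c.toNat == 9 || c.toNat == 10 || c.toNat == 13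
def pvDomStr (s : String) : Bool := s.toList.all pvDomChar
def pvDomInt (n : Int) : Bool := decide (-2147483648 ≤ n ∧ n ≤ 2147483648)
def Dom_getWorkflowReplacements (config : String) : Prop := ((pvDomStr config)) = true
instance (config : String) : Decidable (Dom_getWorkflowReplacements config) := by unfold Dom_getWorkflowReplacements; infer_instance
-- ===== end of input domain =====

-- B replaces A's 10-element dp list by three scalars (common, spec, special); alternative decomposition, same cost.


def pvMOD : Int := 1000000007

-- int(c) for a single digit character (exact on the digit characters Pre_ admits)
def pvC2I (c : Char) : Int := (c.toNat : Int) - 48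

-- ===== PORT A =====
-- one iteration of A's main loop (dp indexing via getD is exact: Pre_ keeps indices in 0..9)
def pvAStep (dp : List Int) (c : Char) : List Int :=
  let total := PySem.Int.mod dp.sum pvMOD
  if c == '?' then
    (List.range 10).map (fun d => PySem.Int.mod (total - dp.getD d 0) pvMOD)
  else
    let d := (pvC2I c).toNat
    (List.replicate 10 (0 : Int)).set d (PySem.Int.mod (total - dp.getD d 0) pvMOD)

def getWorkflowReplacements (config : String) : Int :=
  match config.toList with
  | [] => 0  -- Python raises IndexError here; excluded by Pre_
  | c :: rest =>
    let dp0 := if c == '?' then List.replicate 10 (1 : Int)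
               else (List.replicate 10 (0 : Int)).set (pvC2I c).toNat 1
    PySem.Int.mod (rest.foldl pvAStep dp0).sum pvMOD

-- ===== PORT B =====
def pvBStep (st : Int × Int × Nat) (c : Char) : Int × Int × Nat :=
  let common := st.1; let spec := st.2.1; let special := st.2.2
  let total := PySem.Int.mod (spec + 9 * common) pvMOD
  if c == '?' then
    (PySem.Int.mod (total - common) pvMOD, PySem.Int.mod (total - spec) pvMOD, special)
  else
    let d := (pvC2I c).toNat
    (0, PySem.Int.mod (total - (if d == special then spec else common)) pvMOD, d)

def getWorkflowReplacements_alt (config : String) : Int :=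
  match config.toList with
  | [] => 0  -- B's Python raises IndexError here; excluded by Pre_
  | c :: rest =>
    let st0 : Int × Int × Nat :=
      if c == '?' then (1, 1, 0) else (0, 1, (pvC2I c).toNat)
    let st := rest.foldl pvBStep st0
    PySem.Int.mod (st.2.1 + 9 * st.1) pvMOD

-- ===== PRECONDITION & SPEC =====
-- Pre_: exactly the inputs where A returns: nonempty, every char a digit or '?'
-- (otherwise config[0] raises IndexError or int(...) raises ValueError).
def Pre_getWorkflowReplacements (config : String) : Prop :=
  config.toList ≠ [] ∧ (config.toList.all (fun c => c == '?' || (decide ('0' ≤ c) && decide (c ≤ '9')))) = true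
instance (config : String) : Decidable (Pre_getWorkflowReplacements config) := by
  unfold Pre_getWorkflowReplacements; infer_instance

def pvWitness_getWorkflowReplacements : String := "1?3?"

def Spec_getWorkflowReplacements (config : String) (out : Int) : Prop := out = getWorkflowReplacements_alt config
instance (config : String) (out : Int) : Decidable (Spec_getWorkflowReplacements config out) := by unfold Spec_getWorkflowReplacements; infer_instance

-- ===== CLAIM (what is proved, stated in full; the proofs are below) =====
def Claim_equal_getWorkflowReplacements : Prop := ∀ (config : String), Dom_getWorkflowReplacements config → Pre_getWorkflowReplacements config → Spec_getWorkflowReplacements config (getWorkflowReplacements config)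

-- ===== LEMMAS AND PROOFS =====

-- the dp list that A maintains, expressed through B's three scalars
def pvDpOf (common spec : Int) (sp : Nat) : List Int :=
  (List.range 10).map (fun j => if j = sp then spec else common)

theorem pvDpOf_sum (c s : Int) (sp : Nat) (h : sp < 10) :
    (pvDpOf c s sp).sum = s + 9 * c := by
  interval_cases sp <;> simp [pvDpOf, List.range_succ] <;> ring

theorem pvDpOf_getD (c s : Int) (sp d : Nat) (hsp : sp < 10) (hd : d < 10) :
    (pvDpOf c s sp).getD d 0 = if d = sp then s else c := by
  interval_cases d <;> interval_cases sp <;> simp [pvDpOf, List.range_succ]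

theorem pvSet_replicate (v : Int) (d : Nat) (hd : d < 10) :
    (List.replicate 10 (0 : Int)).set d v = pvDpOf 0 v d := by
  interval_cases d <;> simp [pvDpOf, List.range_succ]

def pvOkChar (c : Char) : Prop := c = '?' ∨ ('0' ≤ c ∧ c ≤ '9')

theorem pvOkChar_digit {c : Char} (h : pvOkChar c) (hne : c ≠ '?') :
    (pvC2I c).toNat < 10 := by
  rcases h with h | ⟨h1, h2⟩
  · exact absurd h hne
  · have h1' : (48 : UInt32) ≤ c.val := h1
    have h2' : c.val ≤ (57 : UInt32) := h2
    have hl : (48 : Nat) ≤ c.val.toNat := UInt32.le_iff_toNat_le.mp h1'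
    have hr : c.val.toNat ≤ 57 := UInt32.le_iff_toNat_le.mp h2'
    simp only [pvC2I, Char.toNat]
    omega

theorem pvStep_eq (c s : Int) (sp : Nat) (ch : Char) (hsp : sp < 10) (hok : pvOkChar ch) :
    pvAStep (pvDpOf c s sp) ch =
      pvDpOf (pvBStep (c, s, sp) ch).1 (pvBStep (c, s, sp) ch).2.1 (pvBStep (c, s, sp) ch).2.2
    ∧ (pvBStep (c, s, sp) ch).2.2 < 10 := by
  by_cases hq : ch = '?'
  · subst hq
    constructor
    · simp only [pvAStep, pvBStep, beq_self_eq_true, if_true]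
      have hsum : (pvDpOf c s sp).sum = s + 9 * c := pvDpOf_sum c s sp hsp
      rw [hsum]
      unfold pvDpOf
      apply List.map_congr_left
      intro d hd
      have hd10 : d < 10 := List.mem_range.mp hd
      rw [show (List.range 10).map (fun j => if j = sp then s else c) = pvDpOf c s sp from rfl,
          pvDpOf_getD c s sp d hsp hd10]
      by_cases h : d = sp <;> simp [h]
    · simpa [pvBStep] using hsp
  · have hq' : (ch == '?') = false := by simp [hq]
    have hd10 : (pvC2I ch).toNat < 10 := pvOkChar_digit hok hq
    constructor
    · simp only [pvAStep, pvBStep, hq', Bool.false_eq_true, if_false]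
      rw [pvDpOf_sum c s sp hsp,
          pvDpOf_getD c s sp ((pvC2I ch).toNat) hsp hd10,
          pvSet_replicate _ _ hd10]
      by_cases h : (pvC2I ch).toNat = sp <;> simp [h]
    · simpa [pvBStep, hq'] using hd10
  
theorem pvFold_eq (l : List Char) (c s : Int) (sp : Nat)
    (hok : ∀ ch ∈ l, pvOkChar ch) (hsp : sp < 10) :
    l.foldl pvAStep (pvDpOf c s sp) =
      pvDpOf (l.foldl pvBStep (c, s, sp)).1 (l.foldl pvBStep (c, s, sp)).2.1
        (l.foldl pvBStep (c, s, sp)).2.2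
    ∧ (l.foldl pvBStep (c, s, sp)).2.2 < 10 := by
  induction l generalizing c s sp with
  | nil => exact ⟨rfl, hsp⟩
  | cons ch t ih =>
    have hch : pvOkChar ch := hok ch (List.mem_cons_self ..)
    obtain ⟨he, hlt⟩ := pvStep_eq c s sp ch hsp hch
    have := ih (pvBStep (c, s, sp) ch).1 (pvBStep (c, s, sp) ch).2.1
      (pvBStep (c, s, sp) ch).2.2 (fun x hx => hok x (List.mem_cons_of_mem _ hx)) hlt
    simpa [List.foldl_cons, he] using this

theorem pvInit_q : List.replicate 10 (1 : Int) = pvDpOf 1 1 0 := by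
  simp [pvDpOf, List.range_succ]

-- ===== VERDICT (by name: the statement is the Claim_ definition above) =====
theorem getWorkflowReplacements_spec : Claim_equal_getWorkflowReplacements := by
  intro config _ hpre
  obtain ⟨hne, hok'⟩ := hpre
  have hok : ∀ c ∈ config.toList, pvOkChar c := by
    intro c hc
    have := List.all_eq_true.mp hok' c hc
    simpa [pvOkChar, decide_eq_true_eq, beq_iff_eq] using this
  unfold Spec_getWorkflowReplacements getWorkflowReplacements getWorkflowReplacements_alt
  cases hcs : config.toList with
  | nil => exact absurd hcs hne
  | cons c rest =>
    have hokc : pvOkChar c := hok c (hcs ▸ List.mem_cons_self ..)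
    have hokr : ∀ ch ∈ rest, pvOkChar ch := fun ch h =>
      hok ch (hcs ▸ List.mem_cons_of_mem _ h)
    by_cases hq : c = '?'
    · subst hq
      simp only [beq_self_eq_true, if_true]
      obtain ⟨he, _⟩ := pvFold_eq rest 1 1 0 hokr (by norm_num)
      rw [pvInit_q, he, pvDpOf_sum _ _ _ (pvFold_eq rest 1 1 0 hokr (by norm_num)).2]
    · have hq' : (c == '?') = false := by simp [hq]
      have hd10 : (pvC2I c).toNat < 10 := pvOkChar_digit hokc hq
      simp only [hq', Bool.false_eq_true, if_false]
      obtain ⟨he, hlt⟩ := pvFold_eq rest 0 1 ((pvC2I c).toNat) hokr hd10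
      rw [pvSet_replicate _ _ hd10, he, pvDpOf_sum _ _ _ hlt]
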